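-- pv_equiv track=rewrite | github.com/rodjul/octopus | src/providers/aws/apigateway/policies/iam/lambda_update_iam_policy.py | valid_parameters
-- ===== SOURCE A (Python) =====
-- def valid_parameters(iam_type, data):
--     if iam_type == "POLICY":
--         for policy in data:
--             if not ("policy_name" in policy and "policy_description" in policy \
--                     and "policy_path" in policy and "policy_document" in policy):
--                 return False
--
--     elif iam_type == "TRUST":
--         for trust in data:
--             if not ("trust_name" in trust and "trust_description" in trust \
--                     and "trust_assume_role_policy_document" in trust ):
--                 return False
--     elif iam_type == "ROLE":
--         for role in data:
--             if not ("role_name" in role and "role_description" in role \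
--                     and "policies" in role and "trust_relationship" in role):
--                 return False
--     return True
-- ===== SOURCE B (Python) =====
-- _REQUIRED = {
--     "POLICY": ("policy_name", "policy_description", "policy_path", "policy_document"),
--     "TRUST": ("trust_name", "trust_description", "trust_assume_role_policy_document"),
--     "ROLE": ("role_name", "role_description", "policies", "trust_relationship"),
-- }
--
-- def valid_parameters(iam_type, data):
--     # Stage 1: fold the items into the set of keys common to EVERY item
--     # (None = no items seen yet, i.e. the universal set).
--     common = None
--     for item in data:
--         keys = set(item)
--         common = keys if common is None else common & keys
--     if common is None:        # no data: nothing to validate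
--         return True
--     # Stage 2: one subset test of the required keys against that intersection.
--     required = _REQUIRED.get(iam_type, ())
--     return all(k in common for k in required)
-- ===== Notes on version B (the rewrite author's own statement) =====
-- stated objective: alternative
-- what changed: Instead of A's per-item early-return loop checking hard-coded keys branch by branch, B first folds all items into the intersection of their key sets and then does ONE subset test of the required-key table entry against that intersection (correct since every item has every required key iff the required keys lie in the intersection of the items' key sets).
import Mathlib
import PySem

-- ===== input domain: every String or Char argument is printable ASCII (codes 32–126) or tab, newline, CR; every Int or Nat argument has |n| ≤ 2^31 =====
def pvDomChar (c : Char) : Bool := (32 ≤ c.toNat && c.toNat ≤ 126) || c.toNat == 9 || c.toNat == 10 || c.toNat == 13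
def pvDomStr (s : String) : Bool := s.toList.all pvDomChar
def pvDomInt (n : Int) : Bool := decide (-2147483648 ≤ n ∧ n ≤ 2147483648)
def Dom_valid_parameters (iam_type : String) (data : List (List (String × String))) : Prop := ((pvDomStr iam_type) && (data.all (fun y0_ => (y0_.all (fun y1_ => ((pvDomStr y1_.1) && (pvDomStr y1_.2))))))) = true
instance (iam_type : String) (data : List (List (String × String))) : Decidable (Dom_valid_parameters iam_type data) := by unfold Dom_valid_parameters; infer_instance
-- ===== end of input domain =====

-- B validates differently: one fold intersects the key sets of all items, then a single
-- subset test checks the required keys against that intersection (objective: alternative).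

-- ===== PORT A =====
-- 'k in policy' (dict key membership) is ported as an assoc-list key scan.
def pvHasKey (item : List (String × String)) (k : String) : Bool :=
  item.any (fun kv => kv.1 == k)

-- the POLICY-branch for-loop with early 'return False'
def pvLoopPolicy : List (List (String × String)) → Bool
  | [] => true
  | policy :: rest =>
    if !(pvHasKey policy "policy_name" && pvHasKey policy "policy_description"
          && pvHasKey policy "policy_path" && pvHasKey policy "policy_document") then false
    else pvLoopPolicy rest

-- the TRUST-branch for-loop
def pvLoopTrust : List (List (String × String)) → Bool
  | [] => true
  | trust :: rest =>
    if !(pvHasKey trust "trust_name" && pvHasKey trust "trust_description"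
          && pvHasKey trust "trust_assume_role_policy_document") then false
    else pvLoopTrust rest

-- the ROLE-branch for-loop
def pvLoopRole : List (List (String × String)) → Bool
  | [] => true
  | role :: rest =>
    if !(pvHasKey role "role_name" && pvHasKey role "role_description"
          && pvHasKey role "policies" && pvHasKey role "trust_relationship") then false
    else pvLoopRole rest

def valid_parameters (iam_type : String) (data : List (List (String × String))) : Bool :=
  if iam_type == "POLICY" then pvLoopPolicy data
  else if iam_type == "TRUST" then pvLoopTrust data
  else if iam_type == "ROLE" then pvLoopRole data
  else true

-- ===== PORT B =====
-- set(item): the set of keys of one item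
def pvKeysOf (item : List (String × String)) : PySem.Set String :=
  PySem.Set.ofList (item.map Prod.fst)

-- one step of the fold: None = universal set (no item seen yet), otherwise intersect
def pvCommonStep (acc : Option (PySem.Set String)) (item : List (String × String)) :
    Option (PySem.Set String) :=
  match acc with
  | none => some (pvKeysOf item)
  | some c => some (PySem.Set.inter c (pvKeysOf item))

-- _REQUIRED.get(iam_type, ())
def pvRequired : PySem.Dict String (List String) :=
  PySem.Dict.ofList
    [("POLICY", ["policy_name", "policy_description", "policy_path", "policy_document"]),
     ("TRUST", ["trust_name", "trust_description", "trust_assume_role_policy_document"]),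
     ("ROLE", ["role_name", "role_description", "policies", "trust_relationship"])]

def valid_parameters_alt (iam_type : String) (data : List (List (String × String))) : Bool :=
  match data.foldl pvCommonStep none with
  | none => true
  | some common => (pvRequired.getD iam_type []).all (fun k => PySem.Set.contains common k)

-- ===== PRECONDITION & SPEC =====
def Spec_valid_parameters (iam_type : String) (data : List (List (String × String))) (out : Bool) : Prop := out = valid_parameters_alt iam_type data
instance (iam_type : String) (data : List (List (String × String))) (out : Bool) : Decidable (Spec_valid_parameters iam_type data out) := by unfold Spec_valid_parameters; infer_instance

-- ===== CLAIM (what is proved, stated in full; the proofs are below) =====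
def Claim_equal_valid_parameters : Prop := ∀ (iam_type : String) (data : List (List (String × String))), Dom_valid_parameters iam_type data → Spec_valid_parameters iam_type data (valid_parameters iam_type data)

-- ===== LEMMAS AND PROOFS =====
-- a required key is in an item's key set iff the item has that key
theorem contains_pvKeysOf (item : List (String × String)) (k : String) :
    PySem.Set.contains (pvKeysOf item) k = pvHasKey item k := by
  simp only [pvKeysOf, pvHasKey, PySem.Set.contains_eq_listContains]
  rw [Bool.eq_iff_iff]
  simp [PySem.Set.mem_ofList, List.any_eq_true, List.mem_map, beq_iff_eq]

theorem contains_inter (c s : PySem.Set String) (k : String) :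
    PySem.Set.contains (PySem.Set.inter c s) k
      = (PySem.Set.contains c k && PySem.Set.contains s k) := by
  simp only [PySem.Set.contains_eq_listContains]
  rw [Bool.eq_iff_iff]
  simp [PySem.Set.mem_inter]

-- Boolean interchange law used to regroup head-key and tail-keys conjuncts
theorem bool_interchange (a b c d : Bool) :
    ((a && b) && (c && d)) = ((a && c) && (b && d)) := by
  cases a <;> cases b <;> cases c <;> cases d <;> rfl

-- the subset test against an intersection splits into two subset tests
theorem all_contains_inter (req : List String) (c : PySem.Set String)
    (d : List (String × String)) :
    req.all (fun k => PySem.Set.contains (PySem.Set.inter c (pvKeysOf d)) k)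
      = (req.all (fun k => PySem.Set.contains c k) && req.all (fun k => pvHasKey d k)) := by
  induction req with
  | nil => rfl
  | cons r rs ih =>
    simp only [List.all_cons]
    rw [ih, contains_inter, contains_pvKeysOf, bool_interchange]

-- the intersection fold, started on an already-seen set c, checks required keys against
-- c and every remaining item
theorem fold_some_eq (req : List String) (data : List (List (String × String)))
    (c : PySem.Set String) :
    (match data.foldl pvCommonStep (some c) with
     | none => true
     | some common => req.all (fun k => PySem.Set.contains common k))
      = (req.all (fun k => PySem.Set.contains c k)
          && data.all (fun item => req.all (fun k => pvHasKey item k))) := by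
  induction data generalizing c with
  | nil => simp
  | cons d rest ih =>
    simp only [List.foldl_cons, pvCommonStep, List.all_cons, ih]
    rw [all_contains_inter, Bool.and_assoc]

-- B computes the all-items key check for its required list
theorem alt_eq (iam_type : String) (data : List (List (String × String))) :
    valid_parameters_alt iam_type data
      = data.all (fun item => (pvRequired.getD iam_type []).all (fun k => pvHasKey item k)) := by
  cases data with
  | nil => rfl
  | cons d rest =>
    unfold valid_parameters_alt
    simp only [List.foldl_cons, pvCommonStep, fold_some_eq, List.all_cons]
    rw [show (fun k => PySem.Set.contains (pvKeysOf d) k) = (fun k => pvHasKey d k) from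
      funext (contains_pvKeysOf d)]

-- each of A's early-return loops is the all-quantified key check over its key list
theorem pvLoopPolicy_eq (data : List (List (String × String))) :
    pvLoopPolicy data = data.all (fun item =>
      (["policy_name", "policy_description", "policy_path", "policy_document"] : List String).all
        (fun k => pvHasKey item k)) := by
  induction data with
  | nil => rfl
  | cons d rest ih =>
    simp only [pvLoopPolicy, List.all_cons, ih]
    cases pvHasKey d "policy_name" <;> cases pvHasKey d "policy_description" <;>
      cases pvHasKey d "policy_path" <;> cases pvHasKey d "policy_document" <;> simp

theorem pvLoopTrust_eq (data : List (List (String × String))) :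
    pvLoopTrust data = data.all (fun item =>
      (["trust_name", "trust_description", "trust_assume_role_policy_document"] : List String).all
        (fun k => pvHasKey item k)) := by
  induction data with
  | nil => rfl
  | cons d rest ih =>
    simp only [pvLoopTrust, List.all_cons, ih]
    cases pvHasKey d "trust_name" <;> cases pvHasKey d "trust_description" <;>
      cases pvHasKey d "trust_assume_role_policy_document" <;> simp

theorem pvLoopRole_eq (data : List (List (String × String))) :
    pvLoopRole data = data.all (fun item =>
      (["role_name", "role_description", "policies", "trust_relationship"] : List String).all
        (fun k => pvHasKey item k)) := by
  induction data with
  | nil => rfl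
  | cons d rest ih =>
    simp only [pvLoopRole, List.all_cons, ih]
    cases pvHasKey d "role_name" <;> cases pvHasKey d "role_description" <;>
      cases pvHasKey d "policies" <;> cases pvHasKey d "trust_relationship" <;> simp

-- ===== VERDICT (by name: the statement is the Claim_ definition above) =====
set_option maxRecDepth 8192 in
theorem valid_parameters_spec : Claim_equal_valid_parameters := by
  intro iam_type data _
  unfold Spec_valid_parameters valid_parameters
  rw [alt_eq]
  by_cases h1 : iam_type = "POLICY"
  · subst h1
    have : pvRequired.getD "POLICY" []
        = ["policy_name", "policy_description", "policy_path", "policy_document"] := by rfl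
    rw [this]
    simp only [beq_self_eq_true, if_true]
    exact pvLoopPolicy_eq data
  · by_cases h2 : iam_type = "TRUST"
    · subst h2
      have : pvRequired.getD "TRUST" []
          = ["trust_name", "trust_description", "trust_assume_role_policy_document"] := by rfl
      rw [this]
      simp only [beq_self_eq_true, if_true,
        if_neg (show ¬(("TRUST" == "POLICY") = true) by decide)]
      exact pvLoopTrust_eq data
    · by_cases h3 : iam_type = "ROLE"
      · subst h3
        have : pvRequired.getD "ROLE" []
            = ["role_name", "role_description", "policies", "trust_relationship"] := by rfl
        rw [this]
        simp only [beq_self_eq_true, if_true,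
          if_neg (show ¬(("ROLE" == "POLICY") = true) by decide),
          if_neg (show ¬(("ROLE" == "TRUST") = true) by decide)]
        exact pvLoopRole_eq data
      · have hreq : pvRequired.getD iam_type [] = [] := by
          rw [PySem.Dict.getD_eq_get?_getD]
          have hg : pvRequired.get? iam_type = none := by
            rw [show pvRequired = PySem.Dict.mk
              [("POLICY", ["policy_name", "policy_description", "policy_path", "policy_document"]),
               ("TRUST", ["trust_name", "trust_description", "trust_assume_role_policy_document"]),
               ("ROLE", ["role_name", "role_description", "policies", "trust_relationship"])] from rfl]
            rw [PySem.Dict.get?_mk_cons, if_neg (by simp [beq_iff_eq]; exact fun e => h1 e.symm),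
                PySem.Dict.get?_mk_cons, if_neg (by simp [beq_iff_eq]; exact fun e => h2 e.symm),
                PySem.Dict.get?_mk_cons, if_neg (by simp [beq_iff_eq]; exact fun e => h3 e.symm)]
            rfl
          rw [hg]; rfl
        rw [hreq,
          if_neg (show ¬((iam_type == "POLICY") = true) by simp [beq_iff_eq]; exact h1),
          if_neg (show ¬((iam_type == "TRUST") = true) by simp [beq_iff_eq]; exact h2),
          if_neg (show ¬((iam_type == "ROLE") = true) by simp [beq_iff_eq]; exact h3)]
        simp
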